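-- pv_equiv track=rewrite | github.com/goran-mahovlic/fpg1 | tools/gen_bram_init.py | generate_verilog_include
-- ===== SOURCE A (Python) =====
-- def pack_initval(values, start_addr):
--     """
--     Pack 16 x 18-bit values into one INITVAL_xx (320 bits).
--     ECP5 DP16KD packs 18-bit words as 20-bit slots (2 unused bits per word).
--     """
--     result = 0
--     for i in range(16):
--         addr = start_addr + i
--         if addr < len(values):
--             val = values[addr]
--         else:
--             val = 0
--         # Pack 18-bit value into 20-bit slot (bits 19:18 unused)
--         result |= (val & 0x3FFFF) << (i * 20)
--     return result
--
-- def generate_verilog_include(values, module_name="pdp1_main_ram"):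
--     """Generate Verilog include file with INITVAL parameters."""
--
--     lines = []
--     lines.append("// Auto-generated BRAM init values")
--     lines.append("// Source: gen_bram_init.py")
--     lines.append(f"// Words: {len(values)}")
--     lines.append("")
--
--     # For 4K x 18-bit, we need 4096/512 = 8 DP16KD blocks
--     # Each DP16KD has 512 x 18-bit words
--     # Each INITVAL_xx holds 16 words
--     # So we need 512/16 = 32 INITVAL parameters per block (INITVAL_00 to INITVAL_1F)
--
--     num_blocks = (len(values) + 511) // 512  # Round up
--
--     for block in range(min(num_blocks, 8)):  # Max 8 blocks for 4K words
--         base_addr = block * 512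
--         lines.append(f"// Block {block}: addresses {base_addr} to {base_addr + 511}")
--
--         for row in range(32):  # 32 INITVAL per block (00 to 1F)
--             start_addr = base_addr + row * 16
--             packed = pack_initval(values, start_addr)
--             # Format as 320-bit hex (80 hex digits)
--             hex_str = format(packed, '080X')
--             param_name = f"INITVAL_{row:02X}"
--             lines.append(f".{param_name}(320'h{hex_str}),")
--
--         lines.append("")
--
--     return '\n'.join(lines)
-- ===== SOURCE B (Python) =====
-- def generate_verilog_include(values, module_name="pdp1_main_ram"):
--     """Generate Verilog include file with INITVAL parameters."""
--     n = len(values)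
--
--     def word(a):
--         # 18-bit word at address a (0 past the end), already masked
--         return (values[a] if a < n else 0) & 0x3FFFF
--
--     out = ["// Auto-generated BRAM init values",
--            "// Source: gen_bram_init.py",
--            f"// Words: {n}",
--            ""]
--     for block in range(min((n + 511) // 512, 8)):
--         base = block * 512
--         out.append(f"// Block {block}: addresses {base} to {base + 511}")
--         out.extend(
--             ".INITVAL_{:02X}(320'h{}),".format(
--                 row,
--                 "".join(f"{word(base + row * 16 + i):05X}" for i in range(15, -1, -1)))
--             for row in range(32))
--         out.append("")
--     return "\n".join(out)
-- ===== Notes on version B (the rewrite author's own statement) =====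
-- stated objective: alternative
-- what changed: B builds each 80-digit INITVAL row by formatting the 16 words directly as 5-digit hex chunks and joining them highest slot first, instead of A's packing into one 320-bit integer with shift/OR and a single '080X' format.
import Mathlib
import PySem

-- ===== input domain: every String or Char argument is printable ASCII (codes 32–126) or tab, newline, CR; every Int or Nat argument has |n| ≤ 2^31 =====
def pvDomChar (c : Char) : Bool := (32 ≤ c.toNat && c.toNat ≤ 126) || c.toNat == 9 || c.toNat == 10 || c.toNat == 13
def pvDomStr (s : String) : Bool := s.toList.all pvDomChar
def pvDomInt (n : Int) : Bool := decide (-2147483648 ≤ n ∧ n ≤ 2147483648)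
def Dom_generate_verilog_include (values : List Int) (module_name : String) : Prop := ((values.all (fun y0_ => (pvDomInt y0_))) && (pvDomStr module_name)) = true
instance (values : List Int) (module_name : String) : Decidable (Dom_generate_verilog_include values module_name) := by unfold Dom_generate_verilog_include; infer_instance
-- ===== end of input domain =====

-- B assembles each 80-digit INITVAL row directly from 16 five-digit hex chunks (joined high
-- slot first), instead of A's big-integer shift/OR packing followed by one 080X format.

-- fixed-width uppercase hex rendering: pvHexFix w n = the w low hex digits of n, most
-- significant first.  For n < 16^w this is exactly Python's format(n, '0{w}X').
def pvHexDigit (d : Nat) : Char := if d < 10 then Char.ofNat (48 + d) else Char.ofNat (55 + d)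

def pvHexFix : Nat → Nat → List Char
  | 0, _ => []
  | w+1, n => pvHexFix w (n / 16) ++ [pvHexDigit (n % 16)]

-- ===== PORT A =====
-- helper pack_initval of A.  'val & 0x3FFFF' is PySem.Int.band val 262143 (Python-exact &);
-- 'val << (i*20)' is '<<<' with the Nat exponent (i*20).toNat, exact since i ≥ 0 here.
def pack_initval (values : List Int) (start_addr : Int) : Int :=
  (PySem.List.pyRange 0 16 1).foldl (fun result i =>
    let addr := start_addr + i
    -- 'values[addr]' is in range whenever the branch is taken on A's actual calls (addr ≥ 0)
    let val : Int := if addr < (values.length : Int) then (PySem.List.pyGet? values addr).getD 0 else 0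
    PySem.Int.bor result ((PySem.Int.band val 262143) <<< ((i * 20).toNat))) 0

def generate_verilog_include (values : List Int) (module_name : String) : String :=
  let lines : List String :=
    ["// Auto-generated BRAM init values",
     "// Source: gen_bram_init.py",
     "// Words: " ++ PySem.Int.toStr (values.length : Int),
     ""]
  let num_blocks : Int := PySem.Int.floordiv ((values.length : Int) + 511) 512
  let lines := (PySem.List.pyRange 0 (min num_blocks 8) 1).foldl (fun lines block =>
    let base_addr := block * 512
    let lines := lines ++ ["// Block " ++ PySem.Int.toStr block ++ ": addresses " ++
      PySem.Int.toStr base_addr ++ " to " ++ PySem.Int.toStr (base_addr + 511)]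
    let lines := (PySem.List.pyRange 0 32 1).foldl (fun lines row =>
      let start_addr := base_addr + row * 16
      let packed := pack_initval values start_addr
      -- format(packed, '080X'): exact, since 0 ≤ packed < 16^80 on every call
      let hex_str := String.mk (pvHexFix 80 packed.toNat)
      -- f"INITVAL_{row:02X}": exact, since 0 ≤ row < 256 on every call
      let param_name := "INITVAL_" ++ String.mk (pvHexFix 2 row.toNat)
      lines ++ ["." ++ param_name ++ "(320'h" ++ hex_str ++ "),"]) lines
    lines ++ [""]) lines
  PySem.Str.join "\n" lines

-- ===== PORT B =====
-- helper word of B: the masked 18-bit word at address a (0 past the end)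
def pvWord (values : List Int) (a : Int) : Int :=
  PySem.Int.band (if a < (values.length : Int) then (PySem.List.pyGet? values a).getD 0 else 0) 262143

def generate_verilog_include_alt (values : List Int) (module_name : String) : String :=
  let n : Int := values.length
  let out : List String :=
    ["// Auto-generated BRAM init values",
     "// Source: gen_bram_init.py",
     "// Words: " ++ PySem.Int.toStr n,
     ""]
  let out := (PySem.List.pyRange 0 (min (PySem.Int.floordiv (n + 511) 512) 8) 1).foldl (fun out block =>
    let base := block * 512
    let out := out ++ ["// Block " ++ PySem.Int.toStr block ++ ": addresses " ++
      PySem.Int.toStr base ++ " to " ++ PySem.Int.toStr (base + 511)]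
    -- one row string per row: 16 five-digit chunks (f"{…:05X}", exact: 0 ≤ word < 16^5),
    -- joined for i = 15 … 0, i.e. highest slot first
    let out := out ++ (PySem.List.pyRange 0 32 1).map (fun row =>
      ".INITVAL_" ++ String.mk (pvHexFix 2 row.toNat) ++ "(320'h" ++
        String.mk ((PySem.List.pyRange 15 (-1) (-1)).flatMap (fun i =>
          pvHexFix 5 (pvWord values (base + row * 16 + i)).toNat)) ++ "),")
    out ++ [""]) out
  PySem.Str.join "\n" out

-- ===== PRECONDITION & SPEC =====
def Spec_generate_verilog_include (values : List Int) (module_name : String) (out : String) : Prop := out = generate_verilog_include_alt values module_name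
instance (values : List Int) (module_name : String) (out : String) : Decidable (Spec_generate_verilog_include values module_name out) := by unfold Spec_generate_verilog_include; infer_instance

-- ===== CLAIM (what is proved, stated in full; the proofs are below) =====
def Claim_equal_generate_verilog_include : Prop := ∀ (values : List Int) (module_name : String), Dom_generate_verilog_include values module_name → Spec_generate_verilog_include values module_name (generate_verilog_include values module_name)

-- ===== LEMMAS AND PROOFS =====

-- disjoint OR is addition: a ||| (b <<< k) = a + b·2^k when a < 2^k
theorem pvLorStep (k a b : Nat) (h : a < 2^k) : a ||| (b <<< k) = a + b * 2^k := by
  rw [Nat.shiftLeft_eq]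
  induction k generalizing a b with
  | zero =>
    have : a = 0 := by omega
    simp [this]
  | succ k ih =>
    have hb1 : a = Nat.bit (decide (a % 2 = 1)) (a / 2) := by
      rcases Nat.even_or_odd a with he | ho
      · have : a % 2 = 0 := Nat.even_iff.mp he
        simp [Nat.bit, this]; omega
      · have : a % 2 = 1 := Nat.odd_iff.mp ho
        simp [Nat.bit, this]; omega
    have hb2 : b * 2^(k+1) = Nat.bit false (b * 2^k) := by
      simp [Nat.bit]; ring
    rw [hb1, hb2, Nat.lor_bit, ih (a/2) b (by omega)]
    simp [Nat.bit]
    rcases Nat.even_or_odd a with he | ho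
    · have : a % 2 = 0 := Nat.even_iff.mp he
      simp [this]; omega
    · have : a % 2 = 1 := Nat.odd_iff.mp ho
      simp [this]; omega

-- bounds for v & 0x3FFFF
theorem pvBandBounds (v : Int) : 0 ≤ PySem.Int.band v 262143 ∧ PySem.Int.band v 262143 < 262144 := by
  unfold PySem.Int.band
  split_ifs with h1 h2 h2
  · constructor
    · positivity
    · have : v.toNat &&& (262143:Int).toNat ≤ (262143:Int).toNat := Nat.and_le_right
      omega
  · omega
  · have : (262143:Int).toNat - ((262143:Int).toNat &&& (-v-1).toNat) ≤ (262143:Int).toNat := Nat.sub_le _ _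
    omega
  · omega

-- splitting a fixed-width hex rendering at a digit boundary
theorem pvHexFix_split (v w hi : Nat) : ∀ lo : Nat, lo < 16^w →
    pvHexFix (v + w) (hi * 16^w + lo) = pvHexFix v hi ++ pvHexFix w lo := by
  induction w with
  | zero =>
    intro lo h
    have : lo = 0 := by omega
    simp [this, pvHexFix]
  | succ w ih =>
    intro lo h
    have hN : hi * 16^(w+1) + lo = lo + (hi * 16^w) * 16 := by ring
    have hdiv : (lo + (hi * 16^w) * 16) / 16 = lo / 16 + hi * 16^w :=
      Nat.add_mul_div_right lo _ (by norm_num)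
    have hmod : (lo + (hi * 16^w) * 16) % 16 = lo % 16 := Nat.add_mul_mod_self_right ..
    have hlt : lo / 16 < 16^w := by
      have : (16:Nat)^(w+1) = 16^w * 16 := by ring
      omega
    show pvHexFix (v + w + 1) (hi * 16^(w+1) + lo) = _
    rw [hN]
    show pvHexFix (v+w) ((lo + hi * 16^w * 16) / 16) ++ [pvHexDigit ((lo + hi * 16^w * 16) % 16)] = _
    rw [hdiv, hmod, Nat.add_comm (lo/16) (hi*16^w), ih (lo/16) hlt]
    show _ = pvHexFix v hi ++ (pvHexFix w (lo/16) ++ [pvHexDigit (lo % 16)])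
    simp

-- little-endian base-16^5 packing of a chunk list
def pvPackList : List Nat → Nat
  | [] => 0
  | c :: cs => c + 1048576 * pvPackList cs

theorem pvPackList_lt : ∀ (cs : List Nat), (∀ c ∈ cs, c < 1048576) →
    pvPackList cs < 1048576 ^ cs.length := by
  intro cs
  induction cs with
  | nil => intro _; simp [pvPackList]
  | cons c cs ih =>
    intro h
    have h1 : c < 1048576 := h c List.mem_cons_self
    have h2 : pvPackList cs < 1048576 ^ cs.length := ih (fun x hx => h x (List.mem_cons_of_mem _ hx))
    have e : (1048576:Nat) ^ (cs.length + 1) = 1048576 * 1048576 ^ cs.length := by ring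
    simp only [pvPackList, List.length_cons, e]
    have := Nat.mul_le_mul_left 1048576 (Nat.succ_le_of_lt h2)
    omega

theorem pvPackList_append_last (c : Nat) : ∀ (cs : List Nat),
    pvPackList (cs ++ [c]) = pvPackList cs + 1048576 ^ cs.length * c := by
  intro cs
  induction cs with
  | nil => simp [pvPackList]
  | cons a cs ih =>
    simp only [List.cons_append, pvPackList, ih, List.length_cons, pow_succ]
    ring

-- the hex digits of a packed row are the concatenated chunk renderings, high chunk first
theorem pvHexFix_packList : ∀ (cs : List Nat), (∀ c ∈ cs, c < 1048576) →
    pvHexFix (5 * cs.length) (pvPackList cs) = cs.reverse.flatMap (pvHexFix 5) := by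
  intro cs
  induction cs with
  | nil => intro _; simp [pvPackList, pvHexFix]
  | cons c cs ih =>
    intro h
    have h1 : c < 1048576 := h c List.mem_cons_self
    have e1 : c + 1048576 * pvPackList cs = pvPackList cs * 16^5 + c := by norm_num; ring
    have e2 : 5 * (c :: cs).length = 5 * cs.length + 5 := by simp; ring
    rw [show pvPackList (c :: cs) = c + 1048576 * pvPackList cs from rfl, e1, e2,
      pvHexFix_split (5 * cs.length) 5 (pvPackList cs) c (by norm_num; omega),
      ih (fun x hx => h x (List.mem_cons_of_mem _ hx))]
    simp

-- the Int-valued OR-fold of A is the cast of the corresponding Nat-valued fold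
theorem pvFoldCast (w : Int → Int) (hw : ∀ i, 0 ≤ w i) :
    ∀ (l : List Int), (∀ i ∈ l, 0 ≤ i) → ∀ (r : Nat),
    l.foldl (fun r i => PySem.Int.bor r ((w i) <<< ((i*20).toNat))) (r : Int)
      = ((l.foldl (fun r i => r ||| ((w i).toNat <<< (i.toNat*20))) r : Nat) : Int) := by
  intro l
  induction l with
  | nil => intro _ r; rfl
  | cons a l ih =>
    intro hmem r
    have ha : 0 ≤ a := hmem a List.mem_cons_self
    have h2 : (a*20).toNat = a.toNat*20 := by omega
    simp only [List.foldl_cons]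
    rw [show w a = ((w a).toNat : Int) from (Int.toNat_of_nonneg (hw a)).symm, h2,
      ← Int.natCast_shiftLeft, PySem.Int.bor_natCast]
    exact ih (fun i hi => hmem i (List.mem_cons_of_mem _ hi)) _

-- the Nat-valued OR-fold over range(k) is base-16^5 packing of the chunk list
theorem pvFoldOr (f : Int → Nat) (hf : ∀ i, f i < 1048576) :
    ∀ (k : Nat), (PySem.List.pyRange 0 (k : Int) 1).foldl
        (fun r i => r ||| (f i <<< (i.toNat*20))) 0
      = pvPackList ((PySem.List.pyRange 0 (k : Int) 1).map f) := by
  intro k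
  induction k with
  | zero => simp [PySem.List.pyRange_one_eq_nil (le_refl (0:Int)), pvPackList]
  | succ k ih =>
    have hcast : ((k+1 : Nat) : Int) = (k : Int) + 1 := by push_cast; ring
    have hrange := PySem.List.pyRange_one_succ_right (Int.natCast_nonneg k)
    have hlen : ((PySem.List.pyRange 0 (k : Int) 1).map f).length = k := by
      simp [PySem.List.length_pyRange_one]
    have hbound : pvPackList ((PySem.List.pyRange 0 (k : Int) 1).map f) < 2^(k*20) := by
      have h1 := pvPackList_lt ((PySem.List.pyRange 0 (k : Int) 1).map f) (by
        intro c hc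
        rcases List.mem_map.mp hc with ⟨i, _, rfl⟩
        exact hf i)
      rw [hlen] at h1
      calc pvPackList _ < 1048576 ^ k := h1
        _ = 2^(k*20) := by
          rw [show (1048576:Nat) = 2^20 from by norm_num, ← pow_mul, Nat.mul_comm]
    rw [hcast, hrange, List.foldl_append, List.map_append, ih]
    simp only [List.foldl_cons, List.foldl_nil, List.map_cons, List.map_nil, Int.toNat_natCast]
    rw [pvPackList_append_last, pvLorStep (k*20) _ _ hbound, hlen,
      show (1048576:Nat)^k = 2^(k*20) from by
        rw [show (1048576:Nat) = 2^20 from by norm_num, ← pow_mul, Nat.mul_comm]]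
    ring

-- one INITVAL row: A's packed 080X rendering = B's reverse-joined 05X chunks
theorem pvRowEq (w : Int → Int) (hw : ∀ i, 0 ≤ w i ∧ w i < 262144) :
    pvHexFix 80 ((PySem.List.pyRange 0 16 1).foldl
        (fun r i => PySem.Int.bor r ((w i) <<< ((i*20).toNat))) 0).toNat
      = (PySem.List.pyRange 15 (-1) (-1)).flatMap (fun i => pvHexFix 5 (w i).toNat) := by
  have hf : ∀ i, (w i).toNat < 1048576 := by
    intro i; have := hw i; omega
  have hmem : ∀ i ∈ PySem.List.pyRange 0 16 1, (0:Int) ≤ i := by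
    intro i hi
    rw [PySem.List.mem_pyRange_one] at hi
    omega
  have hc := pvFoldCast w (fun i => (hw i).1) (PySem.List.pyRange 0 16 1) hmem 0
  rw [Nat.cast_zero] at hc
  have ho := pvFoldOr (fun i => (w i).toNat) hf 16
  push_cast at ho
  rw [hc, Int.toNat_natCast, ho]
  have hlen : ((PySem.List.pyRange 0 (16:Int) 1).map (fun i => (w i).toNat)).length = 16 := by
    simp [PySem.List.length_pyRange_one]
  have := pvHexFix_packList ((PySem.List.pyRange 0 (16:Int) 1).map (fun i => (w i).toNat)) (by
    intro c hc
    rcases List.mem_map.mp hc with ⟨i, _, rfl⟩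
    exact hf i)
  rw [hlen] at this
  rw [show (80:Nat) = 5 * 16 from by norm_num, this, ← List.map_reverse, List.flatMap_map]
  have hrev : PySem.List.pyRange 15 (-1) (-1) = (PySem.List.pyRange 0 16 1).reverse := by
    have h := PySem.List.pyRange_neg_one_eq_reverse 15 (-1)
    norm_num at h ⊢
    exact h
  rw [hrev]

-- one row specialized to the ports' shapes
theorem pvRowEq' (values : List Int) (s : Int) :
    pvHexFix 80 (pack_initval values s).toNat
      = (PySem.List.pyRange 15 (-1) (-1)).flatMap (fun i => pvHexFix 5 (pvWord values (s + i)).toNat) := by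
  simp only [pack_initval, pvWord]
  exact pvRowEq (fun i => PySem.Int.band
    (if s + i < (values.length : Int) then (PySem.List.pyGet? values (s + i)).getD 0 else 0) 262143)
    (fun i => pvBandBounds _)

theorem pvApp3 {A : Type} (p s : List A) {m m2 : List A} (h : m = m2) : p ++ m ++ s = p ++ m2 ++ s := by rw [h]

set_option maxHeartbeats 1000000 in
theorem generate_verilog_include_spec : Claim_equal_generate_verilog_include := by
  intro values module_name _hdom
  show generate_verilog_include values module_name = generate_verilog_include_alt values module_name
  simp only [generate_verilog_include, generate_verilog_include_alt]
  apply congrArg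
  apply congrArg (fun F => List.foldl F _ _)
  funext ls block
  rw [PySem.List.foldl_append_singleton_eq_map]
  apply pvApp3
  apply List.map_congr_left
  intro row _
  rw [← String.append_assoc, show ("." ++ "INITVAL_" : String) = ".INITVAL_" from rfl,
    pvRowEq' values (block * 512 + row * 16)]
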